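-- pv_equiv track=rewrite | github.com/reachlinlen/challenge | puzzle01.py | remShortPath
-- ===== SOURCE A (Python) =====
-- def remShortPath(path):
--     pathwithLen = {}
--     for k in range(len(path)):
--         pathwithLen[k] = len(path[k])
--     sortedPath = sorted(pathwithLen.items(),key=lambda t:t[1],reverse=True)
--     sortedList = []
-- #find out indexes in path that are long
--     for k,l in sortedPath:
--         if len(sortedList) == 0:
--             sortedList.append(k)
--             length = l
--         elif length == l:
--             sortedList.append(k)
--         else:
--             break
--     for index in range(len(sortedList)):
--         sortedList[index] = path[sortedList[index]]
--     return sortedList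
-- ===== SOURCE B (Python) =====
-- def remShortPath(path):
--     best = -1
--     out = []
--     for e in path:
--         n = len(e)
--         if n > best:
--             best = n
--             out = [e]
--         elif n == best:
--             out.append(e)
--     return out
-- ===== Notes on version B (the rewrite author's own statement) =====
-- stated objective: faster
-- what changed: B replaces A's index dict + full descending sort + run-scan + index-back-substitution with a single running-maximum pass that resets or extends the result bucket, no sorting and no index indirection.
import Mathlib
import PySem

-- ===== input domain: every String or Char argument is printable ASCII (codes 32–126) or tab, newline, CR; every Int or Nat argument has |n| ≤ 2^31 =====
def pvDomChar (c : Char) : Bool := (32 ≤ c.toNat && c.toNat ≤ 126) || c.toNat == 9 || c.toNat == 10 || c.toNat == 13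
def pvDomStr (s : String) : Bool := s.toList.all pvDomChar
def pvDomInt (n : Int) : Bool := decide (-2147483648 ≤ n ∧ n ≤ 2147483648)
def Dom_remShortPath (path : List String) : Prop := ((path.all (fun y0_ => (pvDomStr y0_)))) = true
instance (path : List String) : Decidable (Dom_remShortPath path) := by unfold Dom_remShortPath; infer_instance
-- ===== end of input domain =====

-- B replaces A's index dict + stable descending sort + run-scan + index back-substitution
-- by one running-maximum pass over the strings themselves (faster in a timing run).

-- ===== PORT A =====
-- A's second loop: append indices while the length equals the first run's length, `break` otherwise.
-- Python's `length` variable is unassigned before the first iteration and never read there;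
-- the port passes an arbitrary initial value (0) that the first branch always overwrites.
def remShortPathLoop2 : List (Int × Int) → List Int → Int → List Int
  | [], sl, _ => sl
  | (k, l) :: rest, sl, length =>
    if sl.length = 0 then remShortPathLoop2 rest (sl ++ [k]) l
    else if length = l then remShortPathLoop2 rest (sl ++ [k]) length
    else sl

def remShortPath (path : List String) : List String :=
  let pathwithLen : PySem.Dict Int Int :=
    (PySem.List.pyRange 0 (path.length : Int)).foldl
      (fun d k => d.insert k (PySem.Str.len (PySem.List.pyGetD path k ""))) ⟨[]⟩
  let sortedPath := PySem.List.sorted pathwithLen.items (fun t => t.2) true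
  let sortedList := remShortPathLoop2 sortedPath [] 0
  -- third loop: sortedList[index] = path[sortedList[index]]; the stored indices come from
  -- range(len(path)), so the indexing is exact via pyGetD here
  sortedList.map (fun k => PySem.List.pyGetD path k "")

-- ===== PORT B =====
def remShortPath_alt (path : List String) : List String :=
  (path.foldl
    (fun (s : Int × List String) e =>
      let n := PySem.Str.len e
      if n > s.1 then (n, [e])
      else if n == s.1 then (s.1, s.2 ++ [e])
      else s)
    (-1, ([] : List String))).2

-- ===== PRECONDITION & SPEC =====
def Spec_remShortPath (path : List String) (out : List String) : Prop := out = remShortPath_alt path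
instance (path : List String) (out : List String) : Decidable (Spec_remShortPath path out) := by unfold Spec_remShortPath; infer_instance

-- ===== CLAIM (what is proved, stated in full; the proofs are below) =====
def Claim_equal_remShortPath : Prop := ∀ (path : List String), Dom_remShortPath path → Spec_remShortPath path (remShortPath path)

-- ===== LEMMAS AND PROOFS =====

-- the maximum string length of a list, with B's initial accumulator -1
def pvMaxLen (l : List String) : Int :=
  l.foldl (fun a e => max a (PySem.Str.len e)) (-1)

-- path enumerated as (index, length) pairs starting at i — the content of A's dict
def pvEnumFrom (i : Int) : List String → List (Int × Int)
  | [] => []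
  | e :: t => (i, PySem.Str.len e) :: pvEnumFrom (i + 1) t

lemma pvMaxLen_append_singleton (p : List String) (e : String) :
    pvMaxLen (p ++ [e]) = max (pvMaxLen p) (PySem.Str.len e) := by
  simp [pvMaxLen, List.foldl_append]

lemma pvLen_nonneg (e : String) : 0 ≤ PySem.Str.len e := by
  rw [PySem.Str.len_eq]; positivity

lemma b_fold (l : List String) : ∀ (p : List String),
    l.foldl
      (fun (s : Int × List String) e =>
        let n := PySem.Str.len e
        if n > s.1 then (n, [e])
        else if n == s.1 then (s.1, s.2 ++ [e])
        else s)
      (pvMaxLen p, p.filter (fun e => PySem.Str.len e == pvMaxLen p))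
    = (pvMaxLen (p ++ l), (p ++ l).filter (fun e => PySem.Str.len e == pvMaxLen (p ++ l))) := by
  induction l with
  | nil => simp
  | cons e t ih =>
    intro p
    have hM : pvMaxLen (p ++ [e]) = max (pvMaxLen p) (PySem.Str.len e) :=
      pvMaxLen_append_singleton p e
    have hle : ∀ x ∈ p, PySem.Str.len x ≤ pvMaxLen p :=
      (PySem.List.le_foldl_max_int p PySem.Str.len (-1)).2
    have key :
        (fun (s : Int × List String) e =>
          let n := PySem.Str.len e
          if n > s.1 then (n, [e])
          else if n == s.1 then (s.1, s.2 ++ [e])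
          else s)
          (pvMaxLen p, p.filter (fun x => PySem.Str.len x == pvMaxLen p)) e
        = (pvMaxLen (p ++ [e]),
            (p ++ [e]).filter (fun x => PySem.Str.len x == pvMaxLen (p ++ [e]))) := by
      simp only [gt_iff_lt, beq_iff_eq]
      split_ifs with h1 h2
      · have hMx : pvMaxLen (p ++ [e]) = PySem.Str.len e := by omega
        have hfilt : p.filter (fun x => PySem.Str.len x == pvMaxLen (p ++ [e])) = [] := by
          rw [List.filter_eq_nil_iff]
          intro x hx
          have hx2 := hle x hx
          simp only [beq_iff_eq, hMx]
          omega
        rw [List.filter_append, hfilt, hMx]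
        simp
      · have hMx : pvMaxLen (p ++ [e]) = pvMaxLen p := by omega
        rw [List.filter_append, hMx]
        simp [-PySem.Str.len_eq, h2]
      · have hMx : pvMaxLen (p ++ [e]) = pvMaxLen p := by omega
        rw [List.filter_append, hMx]
        simp [-PySem.Str.len_eq, h2]
    simp only [List.foldl_cons, key, ih (p ++ [e]), List.append_assoc, List.singleton_append]

lemma b_spec (path : List String) :
    remShortPath_alt path = path.filter (fun e => PySem.Str.len e == pvMaxLen path) := by
  have h := b_fold path []
  simp only [List.nil_append] at h
  unfold remShortPath_alt
  rw [show ((-1 : Int), ([] : List String)) =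
      (pvMaxLen [], List.filter (fun e => PySem.Str.len e == pvMaxLen []) []) from rfl, h]

-- keys stored in pvEnumFrom i l lie in [i, i + l.length)
lemma pvEnumFrom_keys (l : List String) : ∀ (i : Int) (p : Int × Int),
    p ∈ pvEnumFrom i l → i ≤ p.1 ∧ p.1 < i + l.length := by
  induction l with
  | nil => intro i p h; simp [pvEnumFrom] at h
  | cons e t ih =>
    intro i p h
    simp only [pvEnumFrom, List.mem_cons] at h
    rcases h with h | h
    · subst h
      constructor
      · simp
      · simp only [List.length_cons]
        push_cast
        omega
    · have := ih (i + 1) p h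
      simp only [List.length_cons]
      push_cast
      omega

lemma pvEnumFrom_append_singleton (l : List String) : ∀ (i : Int) (e : String),
    pvEnumFrom i (l ++ [e]) = pvEnumFrom i l ++ [(i + l.length, PySem.Str.len e)] := by
  induction l with
  | nil => intro i e; simp [pvEnumFrom]
  | cons x t ih =>
    intro i e
    simp only [List.cons_append, pvEnumFrom, ih (i + 1) e, List.length_cons]
    push_cast
    ring_nf

lemma pvEnumFrom_snd (l : List String) : ∀ (i : Int),
    (pvEnumFrom i l).map Prod.snd = l.map PySem.Str.len := by
  induction l with
  | nil => intro i; rfl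
  | cons e t ih => intro i; simp [pvEnumFrom, ih (i + 1)]

-- reading back path[pre.length] from pre ++ e :: t yields e (index always in range)
lemma pvGet_mid (pre : List String) (e : String) (t : List String) :
    PySem.List.pyGetD (pre ++ e :: t) (pre.length : Int) "" = e := by
  rw [PySem.List.pyGetD_natCast, List.getD_eq_getElem?_getD,
    List.getElem?_append_right (le_refl _)]
  simp

-- A's first loop builds exactly the enumeration of lengths
lemma dict_fold_go (tail : List String) : ∀ (pre : List String) (d : PySem.Dict Int Int),
    d.items = pvEnumFrom 0 pre →
    ((PySem.List.pyRange (pre.length : Int) ((pre ++ tail).length : Int)).foldl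
      (fun d k => d.insert k (PySem.Str.len (PySem.List.pyGetD (pre ++ tail) k ""))) d).items
    = pvEnumFrom 0 (pre ++ tail) := by
  induction tail with
  | nil =>
    intro pre d h
    simpa [PySem.List.pyRange] using h
  | cons e t ih =>
    intro pre d h
    have hlt : (pre.length : Int) < ((pre ++ e :: t).length : Int) := by
      simp only [List.length_append, List.length_cons]
      push_cast
      omega
    rw [PySem.List.pyRange_one_cons hlt]
    simp only [List.foldl_cons]
    have hc : d.contains (pre.length : Int) = false := by
      rw [Bool.eq_false_iff]
      intro hcon
      simp only [PySem.Dict.contains, List.any_eq_true] at hcon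
      obtain ⟨q, hq, hq2⟩ := hcon
      rw [h] at hq
      have := pvEnumFrom_keys pre 0 q hq
      simp only [beq_iff_eq] at hq2
      omega
    have hins : (d.insert (pre.length : Int)
        (PySem.Str.len (PySem.List.pyGetD (pre ++ e :: t) (pre.length : Int) ""))).items
        = pvEnumFrom 0 (pre ++ [e]) := by
      simp only [PySem.Dict.insert, hc, Bool.false_eq_true, if_false]
      rw [pvGet_mid, pvEnumFrom_append_singleton pre 0 e, h]
      simp
    have ih' := ih (pre ++ [e]) _ hins
    simp only [List.append_assoc, List.singleton_append] at ih' ⊢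
    convert ih' using 4
    simp only [List.length_append, List.length_cons, List.length_nil]
    push_cast
    omega

-- insertBy skips a prefix it does not go before
lemma ins_skip (before : Int × Int → Int × Int → Bool) (x : Int × Int) :
    ∀ (front rest : List (Int × Int)), (∀ y ∈ front, before x y = false) →
    PySem.List.insertBy before x (front ++ rest) = front ++ PySem.List.insertBy before x rest := by
  intro front rest h
  induction front with
  | nil => rfl
  | cons y f ih =>
    have hy : before x y = false := h y (List.mem_cons_self ..)
    simp only [List.cons_append, PySem.List.insertBy, hy, Bool.false_eq_true, if_false,
      List.cons.injEq, true_and]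
    exact ih (fun z hz => h z (List.mem_cons_of_mem _ hz))

-- running maximum of the second components (matches pvMaxLen through pvEnumFrom_snd)
def pvMax2 (l : List (Int × Int)) : Int :=
  l.foldl (fun a p => max a p.2) (-1)

-- the stable descending insertion sort puts the max-key elements first, in input order
lemma sort_invariant (l : List (Int × Int)) :
    ∃ rest,
      l.foldl (fun acc x => PySem.List.insertBy (fun a b => decide (b.2 < a.2)) x acc) [] =
        l.filter (fun p => p.2 == pvMax2 l) ++ rest ∧ ∀ q ∈ rest, q.2 < pvMax2 l := by
  induction l using List.reverseRecOn with
  | nil => exact ⟨[], rfl, by simp⟩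
  | append_singleton l x ih =>
    obtain ⟨rest, heq, hrest⟩ := ih
    have hM' : pvMax2 (l ++ [x]) = max (pvMax2 l) x.2 := by
      simp [pvMax2, List.foldl_append]
    have hle : ∀ p ∈ l, p.2 ≤ pvMax2 l :=
      (PySem.List.le_foldl_max_int l (fun p => p.2) (-1)).2
    have hfr : ∀ y ∈ l.filter (fun p => p.2 == pvMax2 l), y.2 = pvMax2 l := by
      intro y hy
      have := (List.mem_filter.mp hy).2
      simpa using this
    rw [List.foldl_append, List.foldl_cons, List.foldl_nil, heq]
    rcases lt_trichotomy (pvMax2 l) x.2 with hx | hx | hx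
    · -- new strictly larger maximum: x is inserted at the very front
      refine ⟨l.filter (fun p => p.2 == pvMax2 l) ++ rest, ?_, ?_⟩
      · have hstep : PySem.List.insertBy (fun a b => decide (b.2 < a.2)) x
            (l.filter (fun p => p.2 == pvMax2 l) ++ rest)
            = x :: (l.filter (fun p => p.2 == pvMax2 l) ++ rest) := by
          cases hfrr : l.filter (fun p => p.2 == pvMax2 l) ++ rest with
          | nil => simp [PySem.List.insertBy]
          | cons y ys =>
            have hy : y ∈ l.filter (fun p => p.2 == pvMax2 l) ++ rest := by
              rw [hfrr]; exact List.mem_cons_self ..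
            have hylt : y.2 < x.2 := by
              rcases List.mem_append.mp hy with h | h
              · have := hfr y h; omega
              · have := hrest y h; omega
            simp [PySem.List.insertBy, hylt]
        rw [hstep]
        have hMx : pvMax2 (l ++ [x]) = x.2 := by omega
        have hfilt : l.filter (fun p => p.2 == pvMax2 (l ++ [x])) = [] := by
          rw [List.filter_eq_nil_iff]
          intro q hq
          have := hle q hq
          simp only [beq_iff_eq, hMx]
          omega
        rw [List.filter_append, hfilt, hMx]
        simp
      · intro q hq
        rw [hM']
        rcases List.mem_append.mp hq with h | h
        · have := hfr q h; omega
        · have := hrest q h; omega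
    · -- equal maximum: x is appended right after the first run
      refine ⟨rest, ?_, ?_⟩
      · rw [ins_skip _ x _ rest
          (by intro y hy; have := hfr y hy; simp; omega)]
        have hstep : PySem.List.insertBy (fun a b => decide (b.2 < a.2)) x rest
            = x :: rest := by
          cases rest with
          | nil => simp [PySem.List.insertBy]
          | cons y ys =>
            have := hrest y (List.mem_cons_self ..)
            simp [PySem.List.insertBy]
            omega
        rw [hstep]
        have hMx : pvMax2 (l ++ [x]) = pvMax2 l := by omega
        rw [List.filter_append, hMx]
        simp [hx]
      · intro q hq
        have := hrest q hq
        omega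
    · -- smaller: x is inserted somewhere inside rest
      refine ⟨PySem.List.insertBy (fun a b => decide (b.2 < a.2)) x rest, ?_, ?_⟩
      · rw [ins_skip _ x _ rest
          (by intro y hy; have := hfr y hy; simp; omega)]
        have hMx : pvMax2 (l ++ [x]) = pvMax2 l := by omega
        rw [List.filter_append, hMx]
        have : ¬ (x.2 = pvMax2 l) := by omega
        simp [this]
      · intro q hq
        rw [hM']
        rcases (PySem.List.mem_insertBy _ x q rest).mp hq with h | h
        · subst h; omega
        · have := hrest q h; omega

lemma loop2_go (M : Int) : ∀ (front rest : List (Int × Int)) (sl : List Int), sl ≠ [] →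
    (∀ p ∈ front, p.2 = M) → (∀ q ∈ rest, q.2 < M) →
    remShortPathLoop2 (front ++ rest) sl M = sl ++ front.map Prod.fst := by
  intro front
  induction front with
  | nil =>
    intro rest sl hsl hf hr
    cases rest with
    | nil => simp [remShortPathLoop2]
    | cons q r =>
      obtain ⟨k, l⟩ := q
      have hlen : sl.length ≠ 0 := by simpa [List.length_eq_zero_iff] using hsl
      have hne : M ≠ l := by have := hr (k, l) (List.mem_cons_self ..); omega
      simp [remShortPathLoop2, hlen, hne]
  | cons q front ih =>
    intro rest sl hsl hf hr
    obtain ⟨k, l⟩ := q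
    have hl : l = M := hf (k, l) (List.mem_cons_self ..)
    have hlen : sl.length ≠ 0 := by simpa [List.length_eq_zero_iff] using hsl
    subst hl
    simp only [List.cons_append, remShortPathLoop2, hlen, if_false, if_true]
    rw [ih rest (sl ++ [k]) (by simp) (fun p hp => hf p (List.mem_cons_of_mem _ hp)) hr]
    simp

lemma loop2_top (M c : Int) (front rest : List (Int × Int)) (hne : front ≠ [])
    (hf : ∀ p ∈ front, p.2 = M) (hr : ∀ q ∈ rest, q.2 < M) :
    remShortPathLoop2 (front ++ rest) [] c = front.map Prod.fst := by
  cases front with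
  | nil => exact absurd rfl hne
  | cons q ft =>
    obtain ⟨k, l⟩ := q
    have hl : l = M := hf (k, l) (List.mem_cons_self ..)
    simp only [List.cons_append, remShortPathLoop2, List.length_nil,
      List.nil_append]
    rw [hl, loop2_go M ft rest [k] (by simp)
      (fun p hp => hf p (List.mem_cons_of_mem _ hp)) hr]
    simp

-- mapping the surviving indices back through path is filtering path itself
lemma mapback (M : Int) (tail : List String) : ∀ (pre : List String),
    ((pvEnumFrom (pre.length : Int) tail).filter (fun p => p.2 == M)).map
      (fun p => PySem.List.pyGetD (pre ++ tail) p.1 "")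
    = tail.filter (fun e => PySem.Str.len e == M) := by
  induction tail with
  | nil => intro pre; rfl
  | cons e t ih =>
    intro pre
    have ih' := ih (pre ++ [e])
    simp only [List.append_assoc, List.singleton_append, List.length_append,
      List.length_singleton] at ih'
    have hcast : ((pre.length + 1 : Nat) : Int) = (pre.length : Int) + 1 := by push_cast; ring
    rw [hcast] at ih'
    simp only [pvEnumFrom]
    by_cases hM : ((e.length : Nat) : Int) = M
    · simp [hM, ih', pvGet_mid pre e t]
    · simp [hM, ih']

-- ===== VERDICT (by name: the statement is the Claim_ definition above) =====
theorem remShortPath_spec : Claim_equal_remShortPath := by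
  intro path _
  unfold Spec_remShortPath
  by_cases hp : path = []
  · subst hp; decide
  · rw [b_spec]
    unfold remShortPath
    show (remShortPathLoop2
        (PySem.List.sorted
          ((PySem.List.pyRange 0 (path.length : Int)).foldl
            (fun (d : PySem.Dict Int Int) k =>
              d.insert k (PySem.Str.len (PySem.List.pyGetD path k "")))
            (⟨[]⟩ : PySem.Dict Int Int)).items
          (fun t => t.2) true) [] 0).map (fun k => PySem.List.pyGetD path k "")
      = path.filter (fun e => PySem.Str.len e == pvMaxLen path)
    have hitems := dict_fold_go path [] ⟨[]⟩ rfl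
    simp only [List.nil_append, List.length_nil, Nat.cast_zero] at hitems
    rw [hitems, PySem.List.sorted_rev_eq_foldl_insertBy]
    obtain ⟨rest, heq, hrest⟩ := sort_invariant (pvEnumFrom 0 path)
    rw [heq]
    have hMM : pvMax2 (pvEnumFrom 0 path) = pvMaxLen path := by
      unfold pvMax2 pvMaxLen
      rw [← List.foldl_map, pvEnumFrom_snd]
      simp [List.foldl_map]
    have hattain : ∃ q ∈ pvEnumFrom 0 path, q.2 = pvMax2 (pvEnumFrom 0 path) := by
      have hfold : pvMaxLen path = (path.map PySem.Str.len).foldl max (-1) := by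
        unfold pvMaxLen
        rw [← List.foldl_map]
      obtain ⟨e, t, rfl⟩ := List.exists_cons_of_ne_nil hp
      have h1 : PySem.Str.len e ≤ pvMaxLen (e :: t) :=
        (PySem.List.le_foldl_max_int (e :: t) PySem.Str.len (-1)).2 e (List.mem_cons_self ..)
      have h0 := pvLen_nonneg e
      rcases PySem.List.foldl_max_mem ((e :: t).map PySem.Str.len) (-1) with h | h
      · rw [← hfold] at h
        omega
      · rw [← hfold, ← pvEnumFrom_snd _ 0] at h
        obtain ⟨q, hq, hq2⟩ := List.mem_map.mp h
        exact ⟨q, hq, by rw [hq2, hMM]⟩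
    obtain ⟨q, hq, hq2⟩ := hattain
    have hne : (pvEnumFrom 0 path).filter
        (fun p => p.2 == pvMax2 (pvEnumFrom 0 path)) ≠ [] :=
      List.ne_nil_of_mem (List.mem_filter.mpr ⟨hq, by simp [hq2]⟩)
    have hf : ∀ p ∈ (pvEnumFrom 0 path).filter
        (fun p => p.2 == pvMax2 (pvEnumFrom 0 path)), p.2 = pvMax2 (pvEnumFrom 0 path) := by
      intro p hp'
      simpa using (List.mem_filter.mp hp').2
    rw [loop2_top (pvMax2 (pvEnumFrom 0 path)) 0 _ rest hne hf hrest, List.map_map]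
    have hmb := mapback (pvMax2 (pvEnumFrom 0 path)) path []
    simp only [List.nil_append, List.length_nil, Nat.cast_zero] at hmb
    rw [← hMM]
    exact hmb
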